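-- pv_equiv track=rewrite | github.com/Guo-xuejian/leetcode-practice | test.py | oct_to_binary
-- ===== SOURCE A (Python) =====
-- def oct_to_binary(input_int) :
--     # write code here
--     res = 0
--     if input_int < 0:
--         one = 1
--         maxInt = 0
--         for i in range(32):
--             maxInt += one
--             one <<= 1
--         input_int *= -1
--         input_int ^= maxInt
--         input_int += 1
--     while input_int > 0:
--         if input_int & 1 == 1:
--             res += 1
--         input_int >>= 1
--     return res
-- ===== SOURCE B (Python) =====
-- def oct_to_binary(input_int):
--     res = 0
--     if input_int < 0:
--         input_int = ((-input_int) ^ 0xFFFFFFFF) + 1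
--     while input_int > 0:
--         input_int &= input_int - 1
--         res += 1
--     return res
-- ===== Notes on version B (the rewrite author's own statement) =====
-- stated objective: idiomatic
-- what changed: Replaced the iterative mask-building loop by the constant all-ones 32-bit mask written as a literal, and the shift-through-every-bit counting loop by Brian Kernighan's clear-lowest-set-bit loop (one iteration per set bit).
import Mathlib
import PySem

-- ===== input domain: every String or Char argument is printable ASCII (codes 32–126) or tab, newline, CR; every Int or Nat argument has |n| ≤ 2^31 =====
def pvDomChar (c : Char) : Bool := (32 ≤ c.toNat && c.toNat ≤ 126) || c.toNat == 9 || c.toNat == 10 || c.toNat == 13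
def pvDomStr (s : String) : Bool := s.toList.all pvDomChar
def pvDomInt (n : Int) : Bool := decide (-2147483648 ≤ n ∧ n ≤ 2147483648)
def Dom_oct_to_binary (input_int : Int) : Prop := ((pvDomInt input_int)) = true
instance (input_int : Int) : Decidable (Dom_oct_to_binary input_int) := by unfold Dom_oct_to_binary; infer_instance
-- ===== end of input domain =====

-- B replaces A's 32-step mask-building loop by the literal 0xFFFFFFFF and counts bits with
-- Kernighan's clear-lowest-set-bit loop instead of shifting through every bit position (objective: idiomatic).

-- ===== PORT A =====
-- Python: while input_int > 0: if input_int & 1 == 1: res += 1; input_int >>= 1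
def octA_loop (input_int : Int) (res : Int) : Int :=
  if 0 < input_int then
    octA_loop (input_int >>> (1:Nat)) (if PySem.Int.band input_int 1 == 1 then res + 1 else res)
  else res
termination_by input_int.toNat
decreasing_by
  rename_i h
  rw [Int.shiftRight_eq_div_pow]
  omega

def oct_to_binary (input_int : Int) : Int :=
  let input_int :=
    if input_int < 0 then
      -- for i in range(32): maxInt += one; one <<= 1   (state = (one, maxInt))
      let st := (List.range 32).foldl
        (fun (st : Int × Int) _ => (st.1 <<< (1:Nat), st.2 + st.1)) ((1:Int), (0:Int))
      (PySem.Int.bxor (input_int * -1) st.2) + 1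
    else input_int
  octA_loop input_int 0

-- ===== PORT B =====
-- Python: while input_int > 0: input_int &= input_int - 1; res += 1
def octB_loop (input_int : Int) (res : Int) : Int :=
  if 0 < input_int then
    octB_loop (PySem.Int.band input_int (input_int - 1)) (res + 1)
  else res
termination_by input_int.toNat
decreasing_by
  rename_i h
  rw [PySem.Int.band_of_nonneg (by omega) (by omega)]
  have := Nat.and_le_right (n := input_int.toNat) (m := (input_int - 1).toNat)
  omega

def oct_to_binary_alt (input_int : Int) : Int :=
  let n := if input_int < 0 then (PySem.Int.bxor (-input_int) 4294967295) + 1 else input_int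
  octB_loop n 0

-- ===== PRECONDITION & SPEC =====
def Spec_oct_to_binary (input_int : Int) (out : Int) : Prop := out = oct_to_binary_alt input_int
instance (input_int : Int) (out : Int) : Decidable (Spec_oct_to_binary input_int out) := by unfold Spec_oct_to_binary; infer_instance

-- ===== CLAIM (what is proved, stated in full; the proofs are below) =====
def Claim_equal_oct_to_binary : Prop := ∀ (input_int : Int), Dom_oct_to_binary input_int → Spec_oct_to_binary input_int (oct_to_binary input_int)

-- ===== LEMMAS AND PROOFS =====

-- bit-0 and bit-(i+1) of 2k / 2k+1
theorem pvTestBit_two_mul (k : Nat) (i : Nat) : (2 * k).testBit (i + 1) = k.testBit i := by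
  rw [Nat.testBit_succ, Nat.mul_div_cancel_left _ (by omega)]

theorem pvTestBit_two_mul_add_one (k : Nat) (i : Nat) :
    (2 * k + 1).testBit (i + 1) = k.testBit i := by
  rw [Nat.testBit_succ]
  congr 1
  omega

-- odd case: (2k+1) &&& 2k = 2k
theorem pvLand_odd (k : Nat) : (2 * k + 1) &&& (2 * k) = 2 * k := by
  apply Nat.eq_of_testBit_eq
  intro i
  cases i with
  | zero =>
    simp [Nat.testBit_zero, Nat.mul_mod_right]
  | succ i =>
    rw [Nat.testBit_land, pvTestBit_two_mul, pvTestBit_two_mul_add_one, Bool.and_self]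

-- even case: (2k) &&& (2k - 1) = 2 * (k &&& (k-1)) for k > 0
theorem pvLand_even (k : Nat) (hk : 0 < k) :
    (2 * k) &&& (2 * k - 1) = 2 * (k &&& (k - 1)) := by
  have h1 : 2 * k - 1 = 2 * (k - 1) + 1 := by omega
  apply Nat.eq_of_testBit_eq
  intro i
  cases i with
  | zero =>
    simp [Nat.testBit_zero, Nat.mul_mod_right]
  | succ i =>
    rw [Nat.testBit_land, h1, pvTestBit_two_mul, pvTestBit_two_mul_add_one,
      pvTestBit_two_mul, Nat.testBit_land]

theorem pvBitCount_double (j : Nat) :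
    PySem.Int.bitCount ((2 * j : Nat) : Int) = PySem.Int.bitCount (j : Int) := by
  rcases Nat.eq_zero_or_pos j with hj | hj
  · subst hj; rfl
  · rw [PySem.Int.bitCount_natCast (by omega), Nat.mul_mod_right,
      Nat.mul_div_cancel_left _ (by omega)]
    simp

-- Kernighan's step: clearing the lowest set bit drops the bit count by one
theorem pvKernighan : ∀ m : Nat, 0 < m →
    PySem.Int.bitCount ((m &&& (m - 1) : Nat) : Int) + 1 = PySem.Int.bitCount (m : Int) := by
  intro m
  induction m using Nat.strong_induction_on with
  | _ m ih =>
    intro hm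
    rcases Nat.even_or_odd m with ⟨k, hk⟩ | ⟨k, hk⟩
    · -- m = 2k, k > 0
      have hk2 : m = 2 * k := by omega
      have hkpos : 0 < k := by omega
      subst hk2
      rw [pvLand_even k hkpos, pvBitCount_double, pvBitCount_double,
        ih k (by omega) hkpos]
    · -- m = 2k + 1
      have hk2 : m = 2 * k + 1 := by omega
      subst hk2
      have h1 : 2 * k + 1 - 1 = 2 * k := by omega
      rw [h1, pvLand_odd, pvBitCount_double,
        PySem.Int.bitCount_natCast (m := 2 * k + 1) (by omega)]
      have : (2 * k + 1) % 2 = 1 := by omega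
      rw [this]
      have : (2 * k + 1) / 2 = k := by omega
      rw [this]
      omega

-- A's shift loop counts bits
theorem pvAloop : ∀ m : Nat, ∀ res : Int,
    octA_loop (m : Int) res = res + (PySem.Int.bitCount (m : Int) : Int) := by
  intro m
  induction m using Nat.strong_induction_on with
  | _ m ih =>
    intro res
    rcases Nat.eq_zero_or_pos m with hm | hm
    · subst hm
      rw [octA_loop]
      simp [PySem.Int.bitCount_zero]
    · rw [octA_loop]
      have hpos : (0:Int) < (m:Int) := by exact_mod_cast hm
      rw [if_pos hpos]
      have hshift : ((m : Int) >>> (1:Nat)) = ((m / 2 : Nat) : Int) := by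
        rw [Int.shiftRight_eq_div_pow]
        simp
      have hband : PySem.Int.band (m : Int) 1 = ((m % 2 : Nat) : Int) := by
        rw [show ((1:Int)) = ((1:Nat) : Int) from rfl, PySem.Int.band_natCast]
        rw [Nat.and_one_is_mod]
      rw [hshift, ih (m / 2) (by omega), PySem.Int.bitCount_natCast hm]
      rcases Nat.mod_two_eq_zero_or_one m with h2 | h2
      all_goals rw [hband, h2]
      all_goals simp
      all_goals omega
-- B's Kernighan loop counts bits
theorem pvBloop : ∀ m : Nat, ∀ res : Int,
    octB_loop (m : Int) res = res + (PySem.Int.bitCount (m : Int) : Int) := by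
  intro m
  induction m using Nat.strong_induction_on with
  | _ m ih =>
    intro res
    rcases Nat.eq_zero_or_pos m with hm | hm
    · subst hm
      rw [octB_loop]
      simp [PySem.Int.bitCount_zero]
    · rw [octB_loop]
      have hpos : (0:Int) < (m:Int) := by exact_mod_cast hm
      rw [if_pos hpos]
      have hsub : ((m : Int) - 1) = ((m - 1 : Nat) : Int) := by omega
      rw [hsub, PySem.Int.band_natCast]
      have hlt : m &&& (m - 1) < m := by
        have := Nat.and_le_right (n := m) (m := m - 1)
        omega
      rw [ih _ hlt]
      have := pvKernighan m hm
      omega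

-- both preprocessed values agree: A's loop-built mask is 0xFFFFFFFF
theorem pvMask :
    ((List.range 32).foldl (fun (st : Int × Int) _ => (st.1 <<< (1:Nat), st.2 + st.1))
      ((1:Int), (0:Int))).2 = 4294967295 := by decide

theorem pvLoops_agree (n : Int) (hn : 0 ≤ n) : octA_loop n 0 = octB_loop n 0 := by
  have h : n = ((n.toNat : Nat) : Int) := by omega
  rw [h, pvAloop, pvBloop]

-- ===== VERDICT (by name: the statement is the Claim_ definition above) =====
theorem oct_to_binary_spec : Claim_equal_oct_to_binary := by
  intro input_int _
  unfold Spec_oct_to_binary oct_to_binary oct_to_binary_alt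
  by_cases h : input_int < 0
  · simp only [if_pos h, pvMask]
    have hx : input_int * -1 = -input_int := by ring
    rw [hx]
    apply pvLoops_agree
    have : 0 ≤ PySem.Int.bxor (-input_int) 4294967295 := by
      rw [PySem.Int.bxor_of_nonneg (by omega) (by omega)]
      positivity
    omega
  · simp only [if_neg h]
    exact pvLoops_agree input_int (by omega)
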